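-- pv_equiv track=rewrite | github.com/kashastic/vibe_coding_orchestrator | orchestrator/status_updater.py | _strip_auto_block_note
-- ===== SOURCE A (Python) =====
-- AUTO_BLOCK_PREFIX = "AUTO_BLOCKED_BY:"
--
-- def _strip_auto_block_note(notes: str, blocker_task_id: str) -> str:
--     """Remove the AUTO_BLOCKED_BY marker and all following reason lines up to the next marker or blank line."""
--     lines = notes.splitlines()
--     result: list[str] = []
--     i = 0
--     while i < len(lines):
--         line = lines[i]
--         if line.startswith(AUTO_BLOCK_PREFIX) and line.removeprefix(AUTO_BLOCK_PREFIX).strip() == blocker_task_id: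
--             i += 1  # skip the marker line itself
--             # skip all non-empty, non-marker continuation lines (the reason body)
--             while i < len(lines) and lines[i].strip() and not lines[i].startswith(AUTO_BLOCK_PREFIX):
--                 i += 1
--         else:
--             result.append(line)
--             i += 1
--     return "\n".join(result).strip()
-- ===== SOURCE B (Python) =====
-- AUTO_BLOCK_PREFIX = "AUTO_BLOCKED_BY:"
--
-- def _strip_auto_block_note(notes: str, blocker_task_id: str) -> str:
--     """Two staged passes: pass 1 marks indices to delete via the local recurrence
--     drop[i] = marker-match(line_i) or (drop[i-1] and body(line_i)); pass 2 filters."""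
--     lines = notes.splitlines()
--     drop = [False] * len(lines)
--     for i, line in enumerate(lines):
--         if line.startswith(AUTO_BLOCK_PREFIX) and line.removeprefix(AUTO_BLOCK_PREFIX).strip() == blocker_task_id:
--             drop[i] = True
--         elif i > 0 and drop[i - 1] and line.strip() and not line.startswith(AUTO_BLOCK_PREFIX):
--             drop[i] = True
--     return "\n".join(line for line, d in zip(lines, drop) if not d).strip()
-- ===== Notes on version B (the rewrite author's own statement) =====
-- stated objective: alternative
-- what changed: Replaced A's single index-driven while loop with a nested skip-while by two staged passes: pass 1 computes a boolean drop-flag per line from a local recurrence on the previous flag, pass 2 filters the lines by those flags.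
import Mathlib
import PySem

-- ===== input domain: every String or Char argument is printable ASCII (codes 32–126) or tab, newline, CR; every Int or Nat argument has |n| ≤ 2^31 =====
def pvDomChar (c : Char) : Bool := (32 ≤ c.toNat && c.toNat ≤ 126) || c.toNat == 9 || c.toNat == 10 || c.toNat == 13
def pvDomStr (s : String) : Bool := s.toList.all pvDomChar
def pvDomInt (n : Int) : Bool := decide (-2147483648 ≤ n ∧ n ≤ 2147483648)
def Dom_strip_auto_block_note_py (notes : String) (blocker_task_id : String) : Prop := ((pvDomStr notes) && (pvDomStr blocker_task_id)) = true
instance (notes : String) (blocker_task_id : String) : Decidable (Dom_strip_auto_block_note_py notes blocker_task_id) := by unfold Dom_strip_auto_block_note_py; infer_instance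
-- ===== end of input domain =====

-- B replaces A's single index-driven loop with a nested skip-while by two staged passes:
-- pass 1 marks each line to drop via a local recurrence on the previous line's flag,
-- pass 2 filters the lines by the flags (objective: alternative decomposition, same value).

-- AUTO_BLOCK_PREFIX as a character list
def pvPrefix : List Char := "AUTO_BLOCKED_BY:".toList

-- hand port of str.removeprefix (not in PySem): exact — drops the prefix iff the string starts with it
def pvRemoveprefix (l p : List Char) : List Char :=
  if PySem.Chars.startswith l p then l.drop p.length else l

-- the matching-marker test shared by both sources
def pvMatch (bid l : List Char) : Bool :=
  PySem.Chars.startswith l pvPrefix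
    && (PySem.Chars.strip (pvRemoveprefix l pvPrefix) == bid)

-- ===== PORT A =====
-- the inner while's condition: non-empty after strip and not a marker line
def pvBody (l : List Char) : Bool :=
  !(PySem.Chars.strip l).isEmpty && !PySem.Chars.startswith l pvPrefix

-- A's outer while over the remaining lines; the inner while is the dropWhile
def pvLoopA (bid : List Char) : List (List Char) → List (List Char)
  | [] => []
  | line :: rest =>
    if pvMatch bid line then
      pvLoopA bid (rest.dropWhile pvBody)
    else
      line :: pvLoopA bid rest
termination_by lines => lines.length
decreasing_by
  · exact Nat.lt_succ_of_le (List.length_dropWhile_le pvBody rest)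
  · simp

def strip_auto_block_note_py (notes : String) (blocker_task_id : String) : String :=
  String.ofList (PySem.Chars.strip (PySem.Chars.join ['\n']
    (pvLoopA blocker_task_id.toList (PySem.Chars.splitlines notes.toList))))

-- ===== PORT B =====
-- pass 1 of B: the drop flags; 'prev' is drop[i-1] (false at i = 0, as 'i > 0' fails there)
def pvDrops (bid : List Char) (prev : Bool) : List (List Char) → List Bool
  | [] => []
  | line :: rest =>
    let d : Bool :=
      if pvMatch bid line then true
      else if prev && pvBody line then true
      else false
    d :: pvDrops bid d rest

-- pass 2 of B: keep the lines whose flag is false (the join's filtering generator)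
def pvKeep : List (List Char) → List Bool → List (List Char)
  | line :: rest, d :: ds => if d then pvKeep rest ds else line :: pvKeep rest ds
  | _, _ => []

def strip_auto_block_note_py_alt (notes : String) (blocker_task_id : String) : String :=
  String.ofList (PySem.Chars.strip (PySem.Chars.join ['\n']
    (pvKeep (PySem.Chars.splitlines notes.toList)
      (pvDrops blocker_task_id.toList false (PySem.Chars.splitlines notes.toList)))))

-- ===== PRECONDITION & SPEC =====
def Spec_strip_auto_block_note_py (notes : String) (blocker_task_id : String) (out : String) : Prop := out = strip_auto_block_note_py_alt notes blocker_task_id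
instance (notes : String) (blocker_task_id : String) (out : String) : Decidable (Spec_strip_auto_block_note_py notes blocker_task_id out) := by unfold Spec_strip_auto_block_note_py; infer_instance

-- ===== CLAIM (what is proved, stated in full; the proofs are below) =====
def Claim_equal_strip_auto_block_note_py : Prop := ∀ (notes : String) (blocker_task_id : String), Dom_strip_auto_block_note_py notes blocker_task_id → Spec_strip_auto_block_note_py notes blocker_task_id (strip_auto_block_note_py notes blocker_task_id)

-- ===== LEMMAS AND PROOFS =====

-- with prev = true, the kept lines are those after first dropping the reason body
lemma pvKeep_skip (bid : List Char) (lines : List (List Char)) :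
    pvKeep lines (pvDrops bid true lines)
      = pvKeep (lines.dropWhile pvBody) (pvDrops bid false (lines.dropWhile pvBody)) := by
  induction lines with
  | nil => simp [List.dropWhile, pvDrops, pvKeep]
  | cons line rest ih =>
    by_cases hb : pvBody line = true
    · have hm : pvMatch bid line = false := by
        simp only [pvBody, Bool.and_eq_true, Bool.not_eq_true'] at hb
        simp [pvMatch, hb.2]
      simp only [List.dropWhile, hb, pvDrops, hm, Bool.false_eq_true, reduceIte,
        Bool.true_and, pvKeep]
      exact ih
    · by_cases hm : pvMatch bid line = true
      · simp [List.dropWhile, hb, pvDrops, hm, pvKeep]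
      · simp [List.dropWhile, hb, pvDrops, hm, pvKeep]

-- B's two passes compute exactly A's loop result
lemma pvKeep_eq_loopA (bid : List Char) (lines : List (List Char)) :
    pvKeep lines (pvDrops bid false lines) = pvLoopA bid lines := by
  induction lines using pvLoopA.induct bid with
  | case1 => simp [pvKeep, pvLoopA]
  | case2 line rest h ih =>
    simp only [pvDrops, h, reduceIte, pvKeep, pvLoopA]
    rw [pvKeep_skip]
    exact ih
  | case3 line rest h ih =>
    simp only [pvDrops, h, Bool.false_eq_true, reduceIte, Bool.false_and, pvKeep, pvLoopA]
    rw [ih]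

-- ===== VERDICT (by name: the statement is the Claim_ definition above) =====
theorem strip_auto_block_note_py_spec : Claim_equal_strip_auto_block_note_py := by
  intro notes bid _
  unfold Spec_strip_auto_block_note_py strip_auto_block_note_py strip_auto_block_note_py_alt
  rw [pvKeep_eq_loopA]
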